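-- pv_equiv track=rewrite | github.com/programmmer-dani/job-finder | src/domain/job_matcher.py | search_matching_position
-- ===== SOURCE A (Python) =====
-- def search_matching_position(html, position_keywords):
--     if not html or not position_keywords:
--         return False
--     formatted_html = html.lower()
--     for keyword in position_keywords:
--         if keyword.strip().lower() in formatted_html:
--             return True
--     return False
-- ===== SOURCE B (Python) =====
-- def search_matching_position(html, position_keywords):
--     if not html or not position_keywords:
--         return False
--     text = html.lower()
--     buckets = {}
--     for kw in position_keywords:
--         k = kw.strip().lower()
--         if not k:
--             return True  # empty keyword is a substring of the (non-empty) text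
--         buckets.setdefault(k[0], []).append(k)
--     for i, c in enumerate(text):
--         for k in buckets.get(c, ()):
--             if text.startswith(k, i):
--                 return True
--     return False
-- ===== Notes on version B (the rewrite author's own statement) =====
-- stated objective: alternative
-- what changed: B normalises the keywords once into a dict bucketing them by first character, then makes a single left-to-right pass over the text, testing at each position only the keywords whose first character matches there, instead of A's one full substring scan of the HTML per keyword.
import Mathlib
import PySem

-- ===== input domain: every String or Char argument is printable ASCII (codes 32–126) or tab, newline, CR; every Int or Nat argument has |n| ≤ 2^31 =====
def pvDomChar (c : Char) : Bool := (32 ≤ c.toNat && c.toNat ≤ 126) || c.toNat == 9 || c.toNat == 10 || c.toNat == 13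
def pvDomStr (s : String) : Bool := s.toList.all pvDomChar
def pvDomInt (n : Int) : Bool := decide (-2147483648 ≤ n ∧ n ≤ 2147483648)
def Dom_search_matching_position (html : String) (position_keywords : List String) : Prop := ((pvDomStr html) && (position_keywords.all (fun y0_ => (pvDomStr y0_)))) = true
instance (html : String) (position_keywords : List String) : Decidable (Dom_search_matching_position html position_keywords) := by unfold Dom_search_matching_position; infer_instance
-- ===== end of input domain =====

-- B normalises the keywords once into a dict bucketed by first character and makes a
-- single pass over the text, testing at each position only the keywords whose first
-- character matches there (alternative structure; same return value as A everywhere).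


-- ===== PORT A =====
-- the 'for keyword in position_keywords: if … in formatted_html: return True' loop
def pvLoopA (formatted_html : String) (kws : List String) : Bool :=
  match kws with
  | [] => false
  | keyword :: rest =>
    if PySem.Str.isIn (PySem.Str.lower (PySem.Str.strip keyword)) formatted_html then true
    else pvLoopA formatted_html rest

def search_matching_position (html : String) (position_keywords : List String) : Bool :=
  if html = "" ∨ position_keywords = [] then false
  else pvLoopA (PySem.Str.lower html) position_keywords

-- ===== PORT B =====
-- the keyword-preprocessing loop of Source B; 'none' = its early 'return True' on an
-- empty stripped keyword.  'buckets.setdefault(k[0], []).append(k)' is exactly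
-- 'buckets.modify c [] (· ++ [k])' (d[k] = f(d.get(k, dflt)) per PySem.Dict.modify).
def pvBuildBuckets (kws : List String) (buckets : PySem.Dict Char (List String)) :
    Option (PySem.Dict Char (List String)) :=
  match kws with
  | [] => some buckets
  | kw :: rest =>
    let k := PySem.Str.lower (PySem.Str.strip kw)
    if k.toList = [] then none   -- 'if not k: return True'
    else pvBuildBuckets rest (buckets.modify (k.toList.headD default) [] (fun l => l ++ [k]))

-- 'text.startswith(k, i)' ported by hand as a prefix test on text.toList.drop i.toNat
-- (exact for 0 ≤ i ≤ len(text), the only offsets enumerate(text) produces)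
def pvScanKeys (text : String) (i : Int) (ks : List String) : Bool :=
  match ks with
  | [] => false
  | k :: rest =>
    if PySem.Chars.startswith (text.toList.drop i.toNat) k.toList then true
    else pvScanKeys text i rest

-- the 'for i, c in enumerate(text)' loop
def pvScan (text : String) (buckets : PySem.Dict Char (List String)) (ps : List (Int × Char)) : Bool :=
  match ps with
  | [] => false
  | (i, c) :: rest =>
    if pvScanKeys text i (buckets.getD c []) then true
    else pvScan text buckets rest

-- 'return True' (none) vs running the main scan loop over the built buckets
def pvDispatch (text : String) (r : Option (PySem.Dict Char (List String))) : Bool :=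
  match r with
  | none => true
  | some buckets => pvScan text buckets (PySem.List.enumerate text.toList 0)

def search_matching_position_alt (html : String) (position_keywords : List String) : Bool :=
  if html = "" ∨ position_keywords = [] then false
  else pvDispatch (PySem.Str.lower html) (pvBuildBuckets position_keywords PySem.Dict.empty)

-- ===== PRECONDITION & SPEC =====
def Spec_search_matching_position (html : String) (position_keywords : List String) (out : Bool) : Prop := out = search_matching_position_alt html position_keywords
instance (html : String) (position_keywords : List String) (out : Bool) : Decidable (Spec_search_matching_position html position_keywords out) := by unfold Spec_search_matching_position; infer_instance

-- ===== CLAIM (what is proved, stated in full; the proofs are below) =====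
def Claim_equal_search_matching_position : Prop := ∀ (html : String) (position_keywords : List String), Dom_search_matching_position html position_keywords → Spec_search_matching_position html position_keywords (search_matching_position html position_keywords)

-- ===== LEMMAS AND PROOFS =====
theorem pvLoopA_eq_any (f : String) (kws : List String) :
    pvLoopA f kws = kws.any (fun k => PySem.Str.isIn (PySem.Str.lower (PySem.Str.strip k)) f) := by
  induction kws with
  | nil => rfl
  | cons k rest ih =>
    simp only [pvLoopA]
    rw [ih, List.any_cons]
    split_ifs with h <;> simp_all

theorem pvScanKeys_eq_any (t : String) (i : Int) (ks : List String) :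
    pvScanKeys t i ks = ks.any (fun k => PySem.Chars.startswith (t.toList.drop i.toNat) k.toList) := by
  induction ks with
  | nil => rfl
  | cons k rest ih =>
    simp only [pvScanKeys]
    rw [ih, List.any_cons]
    split_ifs with h <;> simp [h]

theorem pvScan_eq_any (t : String) (d : PySem.Dict Char (List String)) (ps : List (Int × Char)) :
    pvScan t d ps = ps.any (fun p =>
      (d.getD p.2 []).any (fun k => PySem.Chars.startswith (t.toList.drop p.1.toNat) k.toList)) := by
  induction ps with
  | nil => rfl
  | cons p rest ih =>
    obtain ⟨i, c⟩ := p
    simp only [pvScan]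
    rw [ih, List.any_cons, pvScanKeys_eq_any]
    split_ifs with h <;> simp [h]

theorem pvBuildBuckets_eq_none_iff (kws : List String) (d : PySem.Dict Char (List String)) :
    pvBuildBuckets kws d = none ↔
      ∃ kw ∈ kws, (PySem.Str.lower (PySem.Str.strip kw)).toList = [] := by
  induction kws generalizing d with
  | nil => simp [pvBuildBuckets]
  | cons kw rest ih =>
    simp only [pvBuildBuckets]
    by_cases hk : (PySem.Str.lower (PySem.Str.strip kw)).toList = []
    · rw [if_pos hk]
      exact iff_of_true rfl ⟨kw, by simp, hk⟩
    · rw [if_neg hk, ih]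
      constructor
      · rintro ⟨a, ha, he⟩
        exact ⟨a, List.mem_cons_of_mem _ ha, he⟩
      · rintro ⟨a, ha, he⟩
        rcases List.mem_cons.mp ha with rfl | ha
        · exact absurd he hk
        · exact ⟨a, ha, he⟩

theorem pvBuildBuckets_getD (kws : List String) (d d' : PySem.Dict Char (List String)) (c : Char)
    (h : pvBuildBuckets kws d = some d') :
    d'.getD c [] = d.getD c [] ++
      (kws.map (fun kw => PySem.Str.lower (PySem.Str.strip kw))).filter
        (fun k => k.toList.head? = some c) := by
  induction kws generalizing d with
  | nil => simp only [pvBuildBuckets, Option.some.injEq] at h; simp [← h]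
  | cons kw rest ih =>
    simp only [pvBuildBuckets] at h
    rcases hkl : (PySem.Str.lower (PySem.Str.strip kw)).toList with _ | ⟨c0, cs⟩
    · rw [if_pos hkl] at h; exact absurd h (by simp)
    · rw [if_neg (by simp [hkl]), hkl, List.headD_cons] at h
      have hrec := ih _ h
      rw [hrec, PySem.Dict.getD_modify, List.map_cons, List.filter_cons]
      by_cases hc : c = c0
      · subst hc
        simp [hkl, List.append_assoc]
      · simp [hkl, hc, Ne.symm hc]

theorem pv_isIn_of_prefix_drop (sub s : List Char) (j : Nat) (hp : sub <+: s.drop j) :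
    PySem.Chars.isIn sub s = true :=
  (PySem.Chars.exists_prefix_drop_iff_isIn sub s).mp ⟨j, hp⟩

theorem pv_isIn_bridge (k text : String) :
    PySem.Str.isIn k text = PySem.Chars.isIn k.toList text.toList := by simp

-- ===== VERDICT (by name: the statement is the Claim_ definition above) =====
theorem search_matching_position_spec : Claim_equal_search_matching_position := by
  intro html kws _
  unfold Spec_search_matching_position search_matching_position search_matching_position_alt
  split_ifs with h
  · rfl
  · rw [pvLoopA_eq_any]
    cases hb : pvBuildBuckets kws PySem.Dict.empty with
    | none =>
      obtain ⟨kw, hkw, hemp⟩ := (pvBuildBuckets_eq_none_iff kws _).mp hb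
      simp only [pvDispatch]
      rw [List.any_eq_true]
      refine ⟨kw, hkw, ?_⟩
      rw [pv_isIn_bridge, hemp]
      exact PySem.Chars.isIn_nil _
    | some d =>
      have hget : ∀ c, d.getD c [] =
          (kws.map (fun kw => PySem.Str.lower (PySem.Str.strip kw))).filter
            (fun k => k.toList.head? = some c) := by
        intro c
        rw [pvBuildBuckets_getD kws _ d c hb, PySem.Dict.getD_empty, List.nil_append]
      simp only [pvDispatch]
      rw [pvScan_eq_any, Bool.eq_iff_iff]
      simp only [List.any_eq_true]
      constructor
      · rintro ⟨kw, hkw, hin⟩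
        rw [pv_isIn_bridge] at hin
        obtain ⟨j, hp⟩ := (PySem.Chars.exists_prefix_drop_iff_isIn _ _).mpr hin
        have hnemp : (PySem.Str.lower (PySem.Str.strip kw)).toList ≠ [] := by
          intro hemp
          rw [(pvBuildBuckets_eq_none_iff kws _).mpr ⟨kw, hkw, hemp⟩] at hb
          simp at hb
        have hdropne : (PySem.Str.lower html).toList.drop j ≠ [] := by
          intro hd; rw [hd] at hp; exact hnemp (List.prefix_nil.mp hp)
        have hj : j < (PySem.Str.lower html).toList.length := by
          by_contra hge
          exact hdropne (List.drop_eq_nil_of_le (by omega))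
        refine ⟨((j : Int), (PySem.Str.lower html).toList[j]), ?_, ?_⟩
        · rw [PySem.List.mem_enumerate_iff]
          exact ⟨j, hj, by simp⟩
        · refine ⟨PySem.Str.lower (PySem.Str.strip kw), ?_, ?_⟩
          · rw [hget, List.mem_filter]
            refine ⟨List.mem_map_of_mem hkw, ?_⟩
            obtain ⟨tail, htl⟩ := hp
            rcases hkl : (PySem.Str.lower (PySem.Str.strip kw)).toList with _ | ⟨a, as⟩
            · exact absurd hkl hnemp
            · have hhead : ((PySem.Str.lower html).toList.drop j).head? = some a := by
                rw [← htl, hkl]; rfl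
              rw [List.head?_drop, List.getElem?_eq_getElem hj] at hhead
              simp only [List.head?_cons, Option.some.injEq, decide_eq_true_eq]
              exact (Option.some_inj.mp hhead).symm
          · rw [PySem.Chars.startswith_iff]
            simpa using hp
      · rintro ⟨⟨i, c⟩, hmem, hany⟩
        rw [PySem.List.mem_enumerate_iff] at hmem
        obtain ⟨j, hj, hpc⟩ := hmem
        have hi : i = (j : Int) := by simpa using congrArg Prod.fst hpc
        subst hi
        obtain ⟨k, hk, hsw⟩ := hany
        rw [hget, List.mem_filter] at hk
        obtain ⟨kw, hkw, rfl⟩ := List.mem_map.mp hk.1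
        refine ⟨kw, hkw, ?_⟩
        rw [pv_isIn_bridge]
        refine pv_isIn_of_prefix_drop _ _ j ?_
        have := (PySem.Chars.startswith_iff _ _).mp hsw
        simpa using this
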